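-- pv_equiv track=rewrite | github.com/rafald1/advent_of_code_2023 | day_14_parabolic_reflector_dish/14_parabolic_reflector_dish_part_2.py | move_rocks_spin_cycle
-- ===== SOURCE A (Python) =====
-- def move_rocks_spin_cycle(platform):
--     # move rocks north: rotate platform by 90 degree counterclockwise, move rocks west, restore platform position
--     platform = [''.join(list(line)) for line in zip(*platform)]
--     platform = ['#'.join([''.join(sorted(section, reverse=True)) for section in line.split('#')]) for line in platform]
--     platform = [''.join(list(line)) for line in zip(*platform)]
--
--     # move rocks west
--     platform = ['#'.join([''.join(sorted(section, reverse=True)) for section in line.split('#')]) for line in platform]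
--
--     # move rocks south: rotate platform by 90 degree counterclockwise, move rocks east, restore platform position
--     platform = [''.join(list(line)) for line in zip(*platform)]
--     platform = ['#'.join([''.join(sorted(section)) for section in line.split('#')]) for line in platform]
--     platform = [''.join(list(line)) for line in zip(*platform)]
--
--     # move rocks east
--     platform = ['#'.join([''.join(sorted(section)) for section in line.split('#')]) for line in platform]
--
--     return platform
-- ===== SOURCE B (Python) =====
-- _CODES_ASC = list(range(128))
-- _CODES_DESC = list(range(127, -1, -1))
-- _CHR = [chr(code) for code in range(128)]
--
--
-- def move_rocks_spin_cycle(platform):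
--     # Counting-scan tilt: one pass per line with a 128-entry counter per segment
--     # (no splitting, no comparison sort); same four-phase spin cycle via transposes.
--     def tilt_line(line, asc):
--         codes = _CODES_ASC if asc else _CODES_DESC
--         out = []
--         append = out.append
--         counts = [0] * 128
--         for ch in line:
--             if ch == '#':
--                 for code in codes:          # flush the finished segment in code order
--                     c = counts[code]
--                     if c:
--                         append(_CHR[code] * c)
--                 append('#')
--                 counts = [0] * 128
--             else:
--                 counts[ord(ch)] += 1
--         for code in codes:                  # flush the last segment
--             c = counts[code]
--             if c:
--                 append(_CHR[code] * c)
--         return ''.join(out)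
--
--     def transpose(grid):
--         return [''.join(col) for col in zip(*grid)]
--
--     platform = transpose(platform)                       # tilt north = west on the transpose
--     platform = [tilt_line(line, False) for line in platform]
--     platform = transpose(platform)
--     platform = [tilt_line(line, False) for line in platform]   # tilt west
--     platform = transpose(platform)                       # tilt south = east on the transpose
--     platform = [tilt_line(line, True) for line in platform]
--     platform = transpose(platform)
--     platform = [tilt_line(line, True) for line in platform]    # tilt east
--     return platform
-- ===== Notes on version B (the rewrite author's own statement) =====
-- stated objective: alternative
-- what changed: Each tilt's per-segment comparison sort (split on '#', sorted, rejoin) is replaced by a single left-to-right counting scan per line: a 128-entry character counter is filled until a '#' resets it and is flushed in ascending or descending code order, so no splitting and no comparison sorting happens.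
import Mathlib
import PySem

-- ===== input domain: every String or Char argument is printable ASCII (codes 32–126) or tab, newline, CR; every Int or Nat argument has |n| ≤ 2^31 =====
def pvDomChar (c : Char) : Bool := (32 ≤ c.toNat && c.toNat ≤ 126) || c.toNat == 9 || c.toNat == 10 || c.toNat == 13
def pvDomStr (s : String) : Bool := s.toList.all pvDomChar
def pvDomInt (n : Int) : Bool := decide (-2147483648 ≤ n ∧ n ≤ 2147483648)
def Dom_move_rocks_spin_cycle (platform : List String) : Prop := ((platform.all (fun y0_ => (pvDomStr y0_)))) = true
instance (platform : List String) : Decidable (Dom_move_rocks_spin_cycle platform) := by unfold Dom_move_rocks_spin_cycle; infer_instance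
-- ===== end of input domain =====

-- B replaces A's per-segment comparison sort (split on '#', sorted, rejoin) by a single
-- counting scan per line (128-entry counter, reset at '#', flushed in code order); same result.

-- ===== PORT A =====
-- exact model of Python's [''.join(list(line)) for line in zip(*platform)]: the grid is
-- truncated to the shortest row's length; shared by both ports (Source B's `transpose` is the
-- same zip-based helper)
def pvTransp (rows : List (List Char)) : List (List Char) :=
  match rows with
  | [] => []
  | r :: rs =>
    let m := rs.foldl (fun acc x => min acc x.length) r.length
    (List.range m).map (fun i => (r :: rs).map (fun row => row.getD i ' '))

-- '#'.join(''.join(sorted(section, reverse=rev)) for section in line.split('#'));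
-- Python compares characters by code point, hence the key Char.toNat
def pvTiltA (line : List Char) (rev : Bool) : List Char :=
  PySem.Chars.join ['#'] ((PySem.Chars.splitOn line ['#']).map
    (fun seg => PySem.List.sorted seg Char.toNat rev))

def move_rocks_spin_cycle (platform : List String) : List String :=
  let p1 := pvTransp (platform.map String.toList)
  let p2 := p1.map (fun line => pvTiltA line true)
  let p3 := pvTransp p2
  let p4 := p3.map (fun line => pvTiltA line true)
  let p5 := pvTransp p4
  let p6 := p5.map (fun line => pvTiltA line false)
  let p7 := pvTransp p6
  let p8 := p7.map (fun line => pvTiltA line false)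
  p8.map String.mk

-- ===== PORT B =====
def pvZeros : List Nat := List.replicate 128 0

-- counts[ord(ch)] += 1
def pvBump (counts : List Nat) (ch : Char) : List Nat :=
  counts.set ch.toNat (counts.getD ch.toNat 0 + 1)

-- def flush(): for code in codes: out.extend(chr(code) * counts[code])
def pvFlush (counts : List Nat) (asc : Bool) : List Char :=
  (if asc then List.range 128 else (List.range 128).reverse).flatMap
    (fun n => List.replicate (counts.getD n 0) (Char.ofNat n))

-- the loop body of tilt_line: state = (out, counts)
def pvStep (asc : Bool) (st : List Char × List Nat) (ch : Char) : List Char × List Nat :=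
  if ch = '#' then (st.1 ++ pvFlush st.2 asc ++ ['#'], pvZeros)
  else (st.1, pvBump st.2 ch)

def pvTiltB (line : List Char) (asc : Bool) : List Char :=
  let r := line.foldl (pvStep asc) ([], pvZeros)
  r.1 ++ pvFlush r.2 asc

def move_rocks_spin_cycle_alt (platform : List String) : List String :=
  let p1 := pvTransp (platform.map String.toList)
  let p2 := p1.map (fun line => pvTiltB line false)
  let p3 := pvTransp p2
  let p4 := p3.map (fun line => pvTiltB line false)
  let p5 := pvTransp p4
  let p6 := p5.map (fun line => pvTiltB line true)
  let p7 := pvTransp p6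
  let p8 := p7.map (fun line => pvTiltB line true)
  p8.map String.mk

-- ===== PRECONDITION & SPEC =====
def Spec_move_rocks_spin_cycle (platform : List String) (out : List String) : Prop := out = move_rocks_spin_cycle_alt platform
instance (platform : List String) (out : List String) : Decidable (Spec_move_rocks_spin_cycle platform out) := by unfold Spec_move_rocks_spin_cycle; infer_instance

-- ===== CLAIM (what is proved, stated in full; the proofs are below) =====
def Claim_equal_move_rocks_spin_cycle : Prop := ∀ (platform : List String), Dom_move_rocks_spin_cycle platform → Spec_move_rocks_spin_cycle platform (move_rocks_spin_cycle platform)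

-- ===== LEMMAS AND PROOFS =====

-- recursive split-on-'#' (proof-side reference for PySem.Chars.splitOn)
def pvSplit (pre : List Char) : List Char → List (List Char)
  | [] => [pre]
  | c :: rest => if c = '#' then pre :: pvSplit [] rest else pvSplit (pre ++ [c]) rest

theorem pv_go_spec (l : List Char) : ∀ (fuel : Nat) (cur : List Char) (acc : List (List Char)),
    l.length < fuel →
    PySem.Chars.splitOn.go ['#'] fuel l cur acc = acc.reverse ++ pvSplit cur.reverse l := by
  induction l with
  | nil =>
    intro fuel cur acc h
    match fuel with
    | fuel + 1 => simp [PySem.Chars.splitOn.go, pvSplit]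
  | cons c rest ih =>
    intro fuel cur acc h
    match fuel with
    | fuel + 1 =>
      by_cases hc : c = '#'
      · subst hc
        have hp : (List.isPrefixOf ['#'] ('#' :: rest)) = true := by
          simp [List.isPrefixOf]
        simp only [PySem.Chars.splitOn.go, hp, if_pos, List.length_cons,
          List.length_nil, List.drop_succ_cons, List.drop_zero]
        rw [ih fuel [] (cur.reverse :: acc) (by simpa using Nat.lt_of_succ_lt_succ h)]
        simp [pvSplit]
      · have hp : (List.isPrefixOf ['#'] (c :: rest)) = false := by
          simp [List.isPrefixOf]
          exact fun hh => absurd hh.symm hc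
        simp only [PySem.Chars.splitOn.go, hp]
        rw [ih fuel (c :: cur) acc (by simpa using Nat.lt_of_succ_lt_succ h)]
        simp [pvSplit, hc]

theorem pv_splitOn_eq (l : List Char) : PySem.Chars.splitOn l ['#'] = pvSplit [] l := by
  unfold PySem.Chars.splitOn
  rw [pv_go_spec l (l.length + 1) [] [] (Nat.lt_succ_self _)]
  simp

theorem pvSplit_shape (l : List Char) : ∀ pre, ∃ a L, pvSplit pre l = a :: L := by
  induction l with
  | nil => intro pre; exact ⟨pre, [], rfl⟩
  | cons c rest ih =>
    intro pre
    by_cases hc : c = '#'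
    · exact ⟨pre, pvSplit [] rest, by simp [pvSplit, hc]⟩
    · obtain ⟨a, L, h⟩ := ih (pre ++ [c]); exact ⟨a, L, by simp [pvSplit, hc, h]⟩

-- ---- the counting flush equals Python's sorted, per segment ----

theorem pv_valid_of_lt (n : Nat) (h : n < 128) : n.isValidChar := by
  unfold Nat.isValidChar; left; omega

theorem pv_toNat_ofNat (n : Nat) (h : n < 128) : (Char.ofNat n).toNat = n := by
  rw [Char.toNat_ofNat, if_pos (pv_valid_of_lt n h)]

theorem pv_toNat_injective : Function.Injective Char.toNat := by
  intro a b h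
  have := congrArg Char.ofNat h
  rwa [Char.ofNat_toNat, Char.ofNat_toNat] at this

-- flush over an initial segment of the code range: the induction vehicle
def pvFR (m : Nat) (counts : List Nat) : List Char :=
  (List.range m).flatMap (fun n => List.replicate (counts.getD n 0) (Char.ofNat n))

theorem pvFR_succ (m : Nat) (counts : List Nat) :
    pvFR (m + 1) counts = pvFR m counts ++
      List.replicate (counts.getD m 0) (Char.ofNat m) := by
  unfold pvFR; rw [List.range_succ, List.flatMap_append]; simp

theorem pvFlush_true_eq (counts : List Nat) : pvFlush counts true = pvFR 128 counts := rfl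

theorem pvFlush_false_eq (counts : List Nat) :
    pvFlush counts false = (pvFlush counts true).reverse := by
  unfold pvFlush
  rw [if_pos rfl, if_neg (by simp), List.reverse_flatMap]
  congr 1
  funext n
  simp [Function.comp, List.reverse_replicate]

theorem pvFR_mem (m : Nat) (counts : List Nat) (hm : m ≤ 128) (x : Char)
    (hx : x ∈ pvFR m counts) : x.toNat < m := by
  unfold pvFR at hx
  obtain ⟨n, hn, hmem⟩ := List.mem_flatMap.1 hx
  have hn' : n < m := List.mem_range.1 hn
  have hx' := (List.mem_replicate.1 hmem).2
  subst hx'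
  rw [pv_toNat_ofNat n (lt_of_lt_of_le hn' hm)]
  exact hn'

theorem pvFR_pairwise (m : Nat) (counts : List Nat) (hm : m ≤ 128) :
    (pvFR m counts).Pairwise (fun a b => a.toNat ≤ b.toNat) := by
  induction m with
  | zero => simp [pvFR]
  | succ m ih =>
    have hm' : m ≤ 128 := Nat.le_of_succ_le hm
    rw [pvFR_succ, List.pairwise_append]
    refine ⟨ih hm', ?_, ?_⟩
    · rw [List.pairwise_replicate]; right; exact le_refl _
    · intro a ha b hb
      have ha' : a.toNat < m := pvFR_mem m counts hm' a ha
      have hb' : b = Char.ofNat m := (List.mem_replicate.1 hb).2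
      rw [hb', pv_toNat_ofNat m (by omega)]
      omega

theorem pvFR_congr (m : Nat) (cs cs' : List Nat)
    (h : ∀ n < m, cs.getD n 0 = cs'.getD n 0) : pvFR m cs = pvFR m cs' := by
  induction m with
  | zero => rfl
  | succ m ih =>
    rw [pvFR_succ, pvFR_succ, ih (fun n hn => h n (by omega)), h m (by omega)]

theorem pvFR_bump_perm (c : Char) (hc : c.toNat < 128) :
    ∀ (m : Nat) (counts : List Nat), c.toNat < counts.length → c.toNat < m →
    (pvFR m (pvBump counts c)).Perm (c :: pvFR m counts) := by
  intro m
  induction m with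
  | zero => intro counts _ h; omega
  | succ m ih =>
    intro counts hlen hm
    rw [pvFR_succ, pvFR_succ]
    by_cases hk : c.toNat = m
    · have hpre : pvFR m (pvBump counts c) = pvFR m counts := by
        apply pvFR_congr
        intro n hn
        unfold pvBump
        rw [List.getD_eq_getElem?_getD, List.getElem?_set_ne (by omega),
          ← List.getD_eq_getElem?_getD]
      have hlast : (pvBump counts c).getD m 0 = counts.getD m 0 + 1 := by
        unfold pvBump
        rw [← hk, List.getD_eq_getElem?_getD, List.getElem?_set_self hlen]
        rfl
      have hch : Char.ofNat m = c := by rw [← hk, Char.ofNat_toNat]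
      rw [hpre, hlast, hch, List.replicate_succ', ← List.append_assoc]
      exact List.perm_append_singleton c _
    · have hk' : c.toNat < m := by omega
      have hlast : (pvBump counts c).getD m 0 = counts.getD m 0 := by
        unfold pvBump
        rw [List.getD_eq_getElem?_getD, List.getElem?_set_ne hk,
          ← List.getD_eq_getElem?_getD]
      rw [hlast]
      exact ((ih counts hlen hk').append_right _).trans
        (by rw [List.cons_append])

theorem pvBump_length (counts : List Nat) (c : Char) :
    (pvBump counts c).length = counts.length := by
  unfold pvBump; exact List.length_set

theorem pvFR_zeros : pvFR 128 pvZeros = [] := by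
  unfold pvFR pvZeros
  rw [List.flatMap_eq_nil_iff]
  intro n hn
  rw [List.getD_replicate _ (List.mem_range.1 hn)]
  rfl

theorem pv_foldl_bump_perm (seg : List Char) (h : ∀ c ∈ seg, c.toNat < 128) :
    ∀ counts : List Nat, counts.length = 128 →
    (pvFR 128 (seg.foldl pvBump counts)).Perm (seg ++ pvFR 128 counts) := by
  induction seg with
  | nil => intro counts _; simp
  | cons c rest ih =>
    intro counts hlen
    have hc : c.toNat < 128 := h c (by simp)
    have h1 : (pvFR 128 (rest.foldl pvBump (pvBump counts c))).Perm
        (rest ++ pvFR 128 (pvBump counts c)) :=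
      ih (fun x hx => h x (by simp [hx])) _ (by rw [pvBump_length, hlen])
    have h2 : (pvFR 128 (pvBump counts c)).Perm (c :: pvFR 128 counts) :=
      pvFR_bump_perm c hc 128 counts (by omega) hc
    exact h1.trans ((h2.append_left rest).trans List.perm_middle)

theorem pv_flush_sorted_asc (seg : List Char) (h : ∀ c ∈ seg, c.toNat < 128) :
    pvFlush (seg.foldl pvBump pvZeros) true = PySem.List.sorted seg Char.toNat false := by
  apply PySem.List.eq_of_perm_of_pairwise_le_of_injective Char.toNat pv_toNat_injective
  · have hp : (pvFlush (seg.foldl pvBump pvZeros) true).Perm seg := by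
      rw [pvFlush_true_eq]
      have := pv_foldl_bump_perm seg h pvZeros rfl
      rwa [pvFR_zeros, List.append_nil] at this
    exact hp.trans (PySem.List.sorted_perm seg Char.toNat false).symm
  · rw [pvFlush_true_eq]; exact pvFR_pairwise 128 _ (le_refl _)
  · exact PySem.List.sorted_pairwise seg Char.toNat

theorem pv_flush_sorted_desc (seg : List Char) (h : ∀ c ∈ seg, c.toNat < 128) :
    pvFlush (seg.foldl pvBump pvZeros) false = PySem.List.sorted seg Char.toNat true := by
  rw [pvFlush_false_eq]
  rw [List.reverse_eq_iff]
  apply PySem.List.eq_of_perm_of_pairwise_le_of_injective Char.toNat pv_toNat_injective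
  · have hp : (pvFlush (seg.foldl pvBump pvZeros) true).Perm seg := by
      rw [pvFlush_true_eq]
      have := pv_foldl_bump_perm seg h pvZeros rfl
      rwa [pvFR_zeros, List.append_nil] at this
    exact hp.trans ((PySem.List.sorted_perm seg Char.toNat true).symm.trans
      (List.reverse_perm _).symm)
  · rw [pvFlush_true_eq]; exact pvFR_pairwise 128 _ (le_refl _)
  · rw [List.pairwise_reverse]
    exact PySem.List.sorted_pairwise_rev seg Char.toNat

-- flush of the counts of seg, either direction, in one statement
theorem pv_flush_sorted (seg : List Char) (h : ∀ c ∈ seg, c.toNat < 128) (asc : Bool) :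
    pvFlush (seg.foldl pvBump pvZeros) asc = PySem.List.sorted seg Char.toNat (!asc) := by
  cases asc
  · exact pv_flush_sorted_desc seg h
  · exact pv_flush_sorted_asc seg h

-- ---- the scan of B, segment by segment ----

theorem pv_foldl_shift (asc : Bool) (line : List Char) :
    ∀ (acc : List Char) (counts : List Nat),
    line.foldl (pvStep asc) (acc, counts) =
      (acc ++ (line.foldl (pvStep asc) ([], counts)).1,
       (line.foldl (pvStep asc) ([], counts)).2) := by
  induction line with
  | nil => intro acc counts; simp
  | cons c rest ih =>
    intro acc counts
    by_cases hc : c = '#'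
    · subst hc
      have hstep : ∀ st : List Char × List Nat,
          pvStep asc st '#' = (st.1 ++ pvFlush st.2 asc ++ ['#'], pvZeros) := by
        intro st; simp [pvStep]
      simp only [List.foldl_cons, hstep, List.nil_append]
      rw [ih (acc ++ pvFlush counts asc ++ ['#']) pvZeros,
        ih (pvFlush counts asc ++ ['#']) pvZeros]
      simp [List.append_assoc]
    · have hstep : ∀ st : List Char × List Nat,
          pvStep asc st c = (st.1, pvBump st.2 c) := by
        intro st; simp [pvStep, hc]
      simp only [List.foldl_cons, hstep]
      exact ih acc (pvBump counts c)

theorem pv_tiltB_split (asc : Bool) : ∀ (line pre : List Char),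
    (∀ c ∈ pre, c.toNat < 128) → (∀ c ∈ line, c.toNat < 128) →
    (line.foldl (pvStep asc) ([], pre.foldl pvBump pvZeros)).1 ++
      pvFlush (line.foldl (pvStep asc) ([], pre.foldl pvBump pvZeros)).2 asc
    = PySem.Chars.join ['#'] ((pvSplit pre line).map
        (fun s => PySem.List.sorted s Char.toNat (!asc))) := by
  intro line
  induction line with
  | nil =>
    intro pre hpre _
    simp only [List.foldl_nil, pvSplit, List.map_cons, List.map_nil,
      PySem.Chars.join_singleton]
    simpa using pv_flush_sorted pre hpre asc
  | cons c rest ih =>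
    intro pre hpre hline
    by_cases hc : c = '#'
    · subst hc
      have hstep : ∀ st : List Char × List Nat,
          pvStep asc st '#' = (st.1 ++ pvFlush st.2 asc ++ ['#'], pvZeros) := by
        intro st; simp [pvStep]
      simp only [List.foldl_cons, hstep, List.nil_append]
      rw [pv_foldl_shift asc rest (pvFlush (pre.foldl pvBump pvZeros) asc ++ ['#']) pvZeros]
      have hrest : ∀ x ∈ rest, x.toNat < 128 := fun x hx => hline x (by simp [hx])
      have hIH := ih [] (by intro x hx; simp at hx) hrest
      simp only [List.foldl_nil] at hIH
      have hsplit : pvSplit pre ('#' :: rest) = pre :: pvSplit [] rest := by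
        simp [pvSplit]
      rw [hsplit]
      obtain ⟨a, L, hshape⟩ := pvSplit_shape rest ([] : List Char)
      rw [hshape, List.map_cons, List.map_cons, PySem.Chars.join_cons_cons]
      have hback : (PySem.List.sorted a Char.toNat (!asc)) ::
          List.map (fun s => PySem.List.sorted s Char.toNat (!asc)) L =
          List.map (fun s => PySem.List.sorted s Char.toNat (!asc)) (pvSplit [] rest) := by
        rw [hshape, List.map_cons]
      rw [hback, ← hIH, pv_flush_sorted pre hpre asc]
      simp [List.append_assoc]
    · have hstep : ∀ st : List Char × List Nat,
          pvStep asc st c = (st.1, pvBump st.2 c) := by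
        intro st; simp [pvStep, hc]
      simp only [List.foldl_cons, hstep]
      have hc' : c.toNat < 128 := hline c (by simp)
      have hbump : pvBump (pre.foldl pvBump pvZeros) c =
          (pre ++ [c]).foldl pvBump pvZeros := by
        rw [List.foldl_append]; rfl
      rw [hbump]
      have hpre' : ∀ x ∈ pre ++ [c], x.toNat < 128 := by
        intro x hx
        rcases List.mem_append.1 hx with h | h
        · exact hpre x h
        · simp at h; subst h; exact hc'
      have hrest : ∀ x ∈ rest, x.toNat < 128 := fun x hx => hline x (by simp [hx])
      rw [ih (pre ++ [c]) hpre' hrest]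
      have hsplit : pvSplit pre (c :: rest) = pvSplit (pre ++ [c]) rest := by
        simp [pvSplit, hc]
      rw [hsplit]

theorem pv_tilt_eq (line : List Char) (h : ∀ c ∈ line, c.toNat < 128) (asc : Bool) :
    pvTiltB line asc = pvTiltA line (!asc) := by
  unfold pvTiltB pvTiltA
  rw [pv_splitOn_eq]
  have := pv_tiltB_split asc line [] (by intro c hc; simp at hc) h
  simpa using this

-- ---- the char-range invariant through the pipeline ----

def pvOk (p : List (List Char)) : Prop := ∀ l ∈ p, ∀ c ∈ l, c.toNat < 128

theorem pvOk_dom (platform : List String) (h : Dom_move_rocks_spin_cycle platform) :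
    pvOk (platform.map String.toList) := by
  intro l hl c hc
  obtain ⟨s, hs, rfl⟩ := List.mem_map.1 hl
  unfold Dom_move_rocks_spin_cycle at h
  have hstr : pvDomStr s = true := by
    have := List.all_eq_true.1 h s hs
    simpa using this
  have hch : pvDomChar c = true := List.all_eq_true.1 hstr c hc
  simp only [pvDomChar, Bool.or_eq_true, Bool.and_eq_true, decide_eq_true_eq,
    beq_iff_eq] at hch
  omega

theorem pvOk_transp (p : List (List Char)) (h : pvOk p) : pvOk (pvTransp p) := by
  intro l hl c hc
  unfold pvTransp at hl
  match p, h with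
  | [], _ => simp at hl
  | r :: rs, h =>
    simp only at hl
    obtain ⟨i, _, rfl⟩ := List.mem_map.1 hl
    obtain ⟨row, hrow, rfl⟩ := List.mem_map.1 hc
    rw [List.getD_eq_getElem?_getD]
    cases hg : row[i]? with
    | none => simp
    | some a =>
      simp only [Option.getD_some]
      exact h row hrow a (List.mem_of_getElem? hg)

theorem pvFlush_mem (counts : List Nat) (asc : Bool) (c : Char)
    (hc : c ∈ pvFlush counts asc) : c.toNat < 128 := by
  cases asc
  · rw [pvFlush_false_eq] at hc
    exact pvFR_mem 128 counts (le_refl _) c (by rw [← pvFlush_true_eq]; exact List.mem_reverse.1 hc)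
  · exact pvFR_mem 128 counts (le_refl _) c hc

theorem pv_foldl_mem (asc : Bool) (line : List Char) :
    ∀ (acc : List Char) (counts : List Nat) (c : Char),
    c ∈ (line.foldl (pvStep asc) (acc, counts)).1 → c ∈ acc ∨ c.toNat < 128 := by
  induction line with
  | nil => intro acc counts c hc; exact Or.inl hc
  | cons ch rest ih =>
    intro acc counts c hc
    by_cases hch : ch = '#'
    · have hstep : ∀ st : List Char × List Nat,
          pvStep asc st ch = (st.1 ++ pvFlush st.2 asc ++ ['#'], pvZeros) := by
        intro st; simp [pvStep, hch]
      simp only [List.foldl_cons, hstep] at hc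
      rcases ih _ _ _ hc with h | h
      · rcases List.mem_append.1 h with h | h
        · rcases List.mem_append.1 h with h | h
          · exact Or.inl h
          · exact Or.inr (pvFlush_mem counts asc c h)
        · simp at h; subst h; exact Or.inr (by decide)
      · exact Or.inr h
    · have hstep : ∀ st : List Char × List Nat,
          pvStep asc st ch = (st.1, pvBump st.2 ch) := by
        intro st; simp [pvStep, hch]
      simp only [List.foldl_cons, hstep] at hc
      exact ih _ _ _ hc

theorem pvOk_tiltB_map (p : List (List Char)) (asc : Bool) :
    pvOk (p.map (fun line => pvTiltB line asc)) := by
  intro l hl c hc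
  obtain ⟨line, _, rfl⟩ := List.mem_map.1 hl
  unfold pvTiltB at hc
  simp only at hc
  rcases List.mem_append.1 hc with h | h
  · rcases pv_foldl_mem asc line [] pvZeros c h with h | h
    · simp at h
    · exact h
  · exact pvFlush_mem _ asc c h

theorem pv_map_tilt (p : List (List Char)) (h : pvOk p) (rev : Bool) :
    p.map (fun line => pvTiltA line rev) = p.map (fun line => pvTiltB line (!rev)) := by
  apply List.map_congr_left
  intro l hl
  rw [pv_tilt_eq l (h l hl) (!rev)]
  simp

theorem pv_map_tiltT (p : List (List Char)) (h : pvOk p) :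
    p.map (fun line => pvTiltA line true) = p.map (fun line => pvTiltB line false) := by
  have := pv_map_tilt p h true
  simpa using this

theorem pv_map_tiltF (p : List (List Char)) (h : pvOk p) :
    p.map (fun line => pvTiltA line false) = p.map (fun line => pvTiltB line true) := by
  have := pv_map_tilt p h false
  simpa using this

-- ===== VERDICT (by name: the statement is the Claim_ definition above) =====
theorem move_rocks_spin_cycle_spec : Claim_equal_move_rocks_spin_cycle := by
  unfold Claim_equal_move_rocks_spin_cycle
  intro platform hDom
  unfold Spec_move_rocks_spin_cycle
  simp only [move_rocks_spin_cycle, move_rocks_spin_cycle_alt]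
  have o0 : pvOk (pvTransp (platform.map String.toList)) :=
    pvOk_transp _ (pvOk_dom platform hDom)
  rw [pv_map_tiltT _ o0]
  rw [pv_map_tiltT _ (pvOk_transp _ (pvOk_tiltB_map _ false))]
  rw [pv_map_tiltF _ (pvOk_transp _ (pvOk_tiltB_map _ false))]
  rw [pv_map_tiltF _ (pvOk_transp _ (pvOk_tiltB_map _ true))]
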